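-- pv_equiv track=rewrite | github.com/SolPict/SolPict-server | app/utils/divide_solving.py | divide_solving
-- ===== SOURCE A (Python) =====
-- def divide_solving(solving):
--     start = 0
--
--     math_expression = []
--     sentence_expression = []
--
--     if solving[0:2] == "\\[" or solving[0:2] == "\\(":
--         sentence_expression.append(None)
--     else:
--         math_expression.append(None)
--
--     for index in range(len(solving) - 2):
--         token = solving[index : index + 2]
--         if token == "\\[" or token == "\\(":
--             sentence_expression.append(solving[start:index])
--             start = index
--         elif token == "\\]" or token == "\\)":
--             math_expression.append(solving[start : index + 3])
--             start = index + 3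
--
--     if start < len(solving):
--         sentence_expression.append(solving[start:])
--
--     return sentence_expression, math_expression
-- ===== SOURCE B (Python) =====
-- def divide_solving(solving):
--     n = len(solving)
--     sentence_expression = []
--     math_expression = []
--
--     if solving[0:2] == "\\[" or solving[0:2] == "\\(":
--         sentence_expression.append(None)
--     else:
--         math_expression.append(None)
--
--     start = 0
--     i = 0
--     while True:
--         positions = [p for p in (solving.find(d, i) for d in ("\\[", "\\(", "\\]", "\\)")) if p != -1]
--         if not positions:
--             break
--         pos = min(positions)
--         if pos > n - 3:
--             break
--         if solving[pos:pos + 2] in ("\\[", "\\("):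
--             sentence_expression.append(solving[start:pos])
--             start = pos
--         else:
--             math_expression.append(solving[start:pos + 3])
--             start = pos + 3
--         i = pos + 1
--
--     if start < n:
--         sentence_expression.append(solving[start:])
--
--     return sentence_expression, math_expression
-- ===== Notes on version B (the rewrite author's own statement) =====
-- stated objective: faster
-- what changed: A slices a 2-char token at every index of the string; B jumps with str.find to the position of the nearest of the four delimiters (min over four searches) and processes only those positions.
import Mathlib
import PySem

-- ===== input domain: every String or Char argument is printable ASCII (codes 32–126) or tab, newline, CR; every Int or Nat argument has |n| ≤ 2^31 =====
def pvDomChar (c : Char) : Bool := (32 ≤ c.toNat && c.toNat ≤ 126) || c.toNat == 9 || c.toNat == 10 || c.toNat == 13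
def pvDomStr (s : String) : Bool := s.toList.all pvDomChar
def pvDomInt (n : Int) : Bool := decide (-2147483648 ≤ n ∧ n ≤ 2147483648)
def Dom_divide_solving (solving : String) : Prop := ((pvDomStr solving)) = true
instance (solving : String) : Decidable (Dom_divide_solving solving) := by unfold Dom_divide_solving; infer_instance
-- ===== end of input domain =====

-- B replaces A's per-index 2-char slicing scan with str.find-based jumps to the next delimiter
-- (objective: a constant-factor speedup on delimiter-sparse input; return values identical).

-- ===== PORT A =====
-- the body of A's for-loop, as a named step function over the state (start, sentence, math)
def pvStepA (s : List Char) (acc : Int × List (Option String) × List (Option String))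
    (index : Int) : Int × List (Option String) × List (Option String) :=
  let token := PySem.Chars.slice s (some index) (some (index + 2))
  if token = ['\\', '['] ∨ token = ['\\', '('] then
    (index, acc.2.1 ++ [some (String.ofList (PySem.Chars.slice s (some acc.1) (some index)))], acc.2.2)
  else if token = ['\\', ']'] ∨ token = ['\\', ')'] then
    (index + 3, acc.2.1, acc.2.2 ++ [some (String.ofList (PySem.Chars.slice s (some acc.1) (some (index + 3))))])
  else acc

def divide_solving (solving : String) : List (Option String) × List (Option String) :=
  let s := solving.toList
  let n : Int := (s.length : Int)
  let init : Int × List (Option String) × List (Option String) :=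
    if PySem.Chars.slice s (some 0) (some 2) = ['\\', '['] ∨
        PySem.Chars.slice s (some 0) (some 2) = ['\\', '('] then
      (0, [none], [])
    else
      (0, [], [none])
  let st := (PySem.List.pyRange 0 (n - 2) 1).foldl (pvStepA s) init
  if st.1 < n then
    (st.2.1 ++ [some (String.ofList (PySem.Chars.slice s (some st.1) none))], st.2.2)
  else
    (st.2.1, st.2.2)

-- ===== PORT B =====
-- positions of the four delimiters searched from i, -1 dropped, then min (Python's min of a list)
def pvNextDelim (s : List Char) (i : Nat) : Option Int :=
  (([PySem.Chars.findFrom s ['\\', '['] (i : Int),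
     PySem.Chars.findFrom s ['\\', '('] (i : Int),
     PySem.Chars.findFrom s ['\\', ']'] (i : Int),
     PySem.Chars.findFrom s ['\\', ')'] (i : Int)]).filter (fun p => p ≠ -1)).min?

-- B's while-loop; fuel only makes the recursion structural (the proof shows s.length + 1 suffices)
def pvLoopB : List Char → Nat → Nat → Int → List (Option String) → List (Option String) →
    Int × List (Option String) × List (Option String)
  | _, 0, _, start, sent, math => (start, sent, math)
  | s, fuel + 1, i, start, sent, math =>
    match pvNextDelim s i with
    | none => (start, sent, math)
    | some pos =>
      if pos > (s.length : Int) - 3 then (start, sent, math)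
      else if PySem.Chars.slice s (some pos) (some (pos + 2)) = ['\\', '['] ∨
          PySem.Chars.slice s (some pos) (some (pos + 2)) = ['\\', '('] then
        pvLoopB s fuel (pos.toNat + 1) pos
          (sent ++ [some (String.ofList (PySem.Chars.slice s (some start) (some pos)))]) math
      else
        pvLoopB s fuel (pos.toNat + 1) (pos + 3) sent
          (math ++ [some (String.ofList (PySem.Chars.slice s (some start) (some (pos + 3))))])

def divide_solving_alt (solving : String) : List (Option String) × List (Option String) :=
  let s := solving.toList
  let n : Int := (s.length : Int)
  let init : Int × List (Option String) × List (Option String) :=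
    if PySem.Chars.slice s (some 0) (some 2) = ['\\', '['] ∨
        PySem.Chars.slice s (some 0) (some 2) = ['\\', '('] then
      (0, [none], [])
    else
      (0, [], [none])
  let st := pvLoopB s (s.length + 1) 0 init.1 init.2.1 init.2.2
  if st.1 < n then
    (st.2.1 ++ [some (String.ofList (PySem.Chars.slice s (some st.1) none))], st.2.2)
  else
    (st.2.1, st.2.2)

-- ===== PRECONDITION & SPEC =====
def Spec_divide_solving (solving : String) (out : List (Option String) × List (Option String)) : Prop := out = divide_solving_alt solving
instance (solving : String) (out : List (Option String) × List (Option String)) : Decidable (Spec_divide_solving solving out) := by unfold Spec_divide_solving; infer_instance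

-- ===== CLAIM (what is proved, stated in full; the proofs are below) =====
def Claim_equal_divide_solving : Prop := ∀ (solving : String), Dom_divide_solving solving → Spec_divide_solving solving (divide_solving solving)

-- ===== LEMMAS AND PROOFS =====

-- any of the four 2-char delimiters starts at position j of s
def pvHasDelim (s : List Char) (j : Nat) : Prop :=
  ['\\', '['] <+: s.drop j ∨ ['\\', '('] <+: s.drop j ∨
  ['\\', ']'] <+: s.drop j ∨ ['\\', ')'] <+: s.drop j

lemma pvToken_eq (s : List Char) (index : Int) (h : 0 ≤ index) :
    PySem.Chars.slice s (some index) (some (index + 2)) = (s.drop index.toNat).take 2 := by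
  show PySem.List.slice s (some index) (some (index + 2)) = _
  rw [PySem.List.slice_toNat s h (by omega)]
  congr 1
  omega

lemma pvTake_two_eq_iff (l sub : List Char) (h : sub.length = 2) :
    l.take 2 = sub ↔ sub <+: l := by
  rw [List.prefix_iff_eq_take, h]
  exact eq_comm

lemma pvInfix_drop_iff (sub s : List Char) (i : Nat) :
    sub <:+: s.drop i ↔ ∃ j, i ≤ j ∧ sub <+: s.drop j := by
  constructor
  · rintro ⟨t, u, h⟩
    refine ⟨i + t.length, by omega, ?_⟩
    rw [← List.drop_drop, ← h, List.append_assoc, List.drop_left]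
    exact List.prefix_append _ _
  · rintro ⟨j, hij, hpre⟩
    have hj : s.drop j = (s.drop i).drop (j - i) := by
      rw [List.drop_drop]
      congr 1
      omega
    rw [hj] at hpre
    exact hpre.isInfix.trans (List.drop_suffix _ _).isInfix

lemma pvFindFrom_spec' (s sub : List Char) (i : Nat) (hi : i ≤ s.length)
    (h : PySem.Chars.findFrom s sub (i : Int) ≠ -1) :
    (i : Int) ≤ PySem.Chars.findFrom s sub (i : Int) ∧
    sub <+: s.drop (PySem.Chars.findFrom s sub (i : Int)).toNat ∧
    ∀ j : Nat, i ≤ j → (j : Int) < PySem.Chars.findFrom s sub (i : Int) → ¬ sub <+: s.drop j := by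
  obtain ⟨h1, h2, h3⟩ := PySem.Chars.findFrom_natCast_spec s sub i hi h
  exact ⟨h1, h2, fun j hj hlt => h3 j hj (by omega)⟩

lemma pvFindFrom_ne_of_prefix (s sub : List Char) (i j : Nat) (hi : i ≤ s.length) (hj : i ≤ j)
    (h : sub <+: s.drop j) : PySem.Chars.findFrom s sub (i : Int) ≠ -1 := by
  intro hcon
  rw [PySem.Chars.findFrom_natCast_eq_neg_one_iff s sub i hi] at hcon
  exact hcon ((pvInfix_drop_iff sub s i).mpr ⟨j, hj, h⟩)

lemma pvNextDelim_none (s : List Char) (i : Nat) (hi : i ≤ s.length)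
    (h : pvNextDelim s i = none) : ∀ j, i ≤ j → ¬ pvHasDelim s j := by
  unfold pvNextDelim at h
  rw [List.min?_eq_none_iff, List.filter_eq_nil_iff] at h
  intro j hj hd
  rcases hd with hp | hp | hp | hp
  · exact h (PySem.Chars.findFrom s ['\\', '['] (i : Int)) (by simp)
      (by simpa using pvFindFrom_ne_of_prefix s ['\\', '['] i j hi hj hp)
  · exact h (PySem.Chars.findFrom s ['\\', '('] (i : Int)) (by simp)
      (by simpa using pvFindFrom_ne_of_prefix s ['\\', '('] i j hi hj hp)
  · exact h (PySem.Chars.findFrom s ['\\', ']'] (i : Int)) (by simp)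
      (by simpa using pvFindFrom_ne_of_prefix s ['\\', ']'] i j hi hj hp)
  · exact h (PySem.Chars.findFrom s ['\\', ')'] (i : Int)) (by simp)
      (by simpa using pvFindFrom_ne_of_prefix s ['\\', ')'] i j hi hj hp)

lemma pvNextDelim_some (s : List Char) (i : Nat) (hi : i ≤ s.length) (pos : Int)
    (h : pvNextDelim s i = some pos) :
    (i : Int) ≤ pos ∧ pvHasDelim s pos.toNat ∧
    ∀ j : Nat, i ≤ j → (j : Int) < pos → ¬ pvHasDelim s j := by
  unfold pvNextDelim at h
  rw [List.min?_eq_some_iff] at h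
  obtain ⟨hmem, hmin⟩ := h
  simp only [List.mem_filter, List.mem_cons, List.not_mem_nil, or_false, decide_eq_true_eq] at hmem
  obtain ⟨hcases, hne⟩ := hmem
  have key : ∀ (sub : List Char), pos = PySem.Chars.findFrom s sub (i : Int) →
      (i : Int) ≤ pos ∧ sub <+: s.drop pos.toNat := by
    intro sub hsub
    obtain ⟨h1, h2, _⟩ := pvFindFrom_spec' s sub i hi (hsub ▸ hne)
    exact ⟨hsub ▸ h1, hsub ▸ h2⟩
  have hmain : (i : Int) ≤ pos ∧ pvHasDelim s pos.toNat := by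
    rcases hcases with hc | hc | hc | hc
    · obtain ⟨h1, h2⟩ := key _ hc; exact ⟨h1, Or.inl h2⟩
    · obtain ⟨h1, h2⟩ := key _ hc; exact ⟨h1, Or.inr (Or.inl h2)⟩
    · obtain ⟨h1, h2⟩ := key _ hc; exact ⟨h1, Or.inr (Or.inr (Or.inl h2))⟩
    · obtain ⟨h1, h2⟩ := key _ hc; exact ⟨h1, Or.inr (Or.inr (Or.inr h2))⟩
  refine ⟨hmain.1, hmain.2, ?_⟩
  intro j hj hlt hd
  have blocked : ∀ (sub : List Char),
      PySem.Chars.findFrom s sub (i : Int) ∈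
        [PySem.Chars.findFrom s ['\\', '['] (i : Int),
         PySem.Chars.findFrom s ['\\', '('] (i : Int),
         PySem.Chars.findFrom s ['\\', ']'] (i : Int),
         PySem.Chars.findFrom s ['\\', ')'] (i : Int)] →
      sub <+: s.drop j → False := by
    intro sub hmemlist hp
    have hne' := pvFindFrom_ne_of_prefix s sub i j hi hj hp
    have hle := hmin (PySem.Chars.findFrom s sub (i : Int))
      (List.mem_filter.mpr ⟨hmemlist, by simpa using hne'⟩)
    obtain ⟨h1, _, h3⟩ := pvFindFrom_spec' s sub i hi hne'
    exact h3 j hj (by omega) hp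
  rcases hd with hp | hp | hp | hp
  · exact blocked ['\\', '['] (by simp) hp
  · exact blocked ['\\', '('] (by simp) hp
  · exact blocked ['\\', ']'] (by simp) hp
  · exact blocked ['\\', ')'] (by simp) hp

lemma pvStepA_id (s : List Char) (index : Int) (h0 : 0 ≤ index)
    (h : ¬ pvHasDelim s index.toNat) (acc : Int × List (Option String) × List (Option String)) :
    pvStepA s acc index = acc := by
  unfold pvStepA
  rw [pvToken_eq s index h0]
  have hc1 : ¬ ((s.drop index.toNat).take 2 = ['\\', '['] ∨ (s.drop index.toNat).take 2 = ['\\', '(']) := by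
    rintro (ht | ht)
    · exact h (Or.inl ((pvTake_two_eq_iff _ _ rfl).mp ht))
    · exact h (Or.inr (Or.inl ((pvTake_two_eq_iff _ _ rfl).mp ht)))
  have hc2 : ¬ ((s.drop index.toNat).take 2 = ['\\', ']'] ∨ (s.drop index.toNat).take 2 = ['\\', ')']) := by
    rintro (ht | ht)
    · exact h (Or.inr (Or.inr (Or.inl ((pvTake_two_eq_iff _ _ rfl).mp ht))))
    · exact h (Or.inr (Or.inr (Or.inr ((pvTake_two_eq_iff _ _ rfl).mp ht))))
  rw [if_neg hc1, if_neg hc2]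

lemma pvStepA_open (s : List Char) (index : Int) (h0 : 0 ≤ index)
    (ht : (s.drop index.toNat).take 2 = ['\\', '['] ∨ (s.drop index.toNat).take 2 = ['\\', '('])
    (acc : Int × List (Option String) × List (Option String)) :
    pvStepA s acc index =
      (index, acc.2.1 ++ [some (String.ofList (PySem.Chars.slice s (some acc.1) (some index)))], acc.2.2) := by
  unfold pvStepA
  rw [pvToken_eq s index h0, if_pos ht]

lemma pvStepA_close (s : List Char) (index : Int) (h0 : 0 ≤ index)
    (hno : ¬ ((s.drop index.toNat).take 2 = ['\\', '['] ∨ (s.drop index.toNat).take 2 = ['\\', '(']))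
    (ht : (s.drop index.toNat).take 2 = ['\\', ']'] ∨ (s.drop index.toNat).take 2 = ['\\', ')'])
    (acc : Int × List (Option String) × List (Option String)) :
    pvStepA s acc index =
      (index + 3, acc.2.1, acc.2.2 ++ [some (String.ofList (PySem.Chars.slice s (some acc.1) (some (index + 3))))]) := by
  unfold pvStepA
  rw [pvToken_eq s index h0, if_neg hno, if_pos ht]

lemma pvFold_id (s : List Char) (l : List Int)
    (h : ∀ j ∈ l, ∀ acc, pvStepA s acc j = acc)
    (acc : Int × List (Option String) × List (Option String)) :
    l.foldl (pvStepA s) acc = acc := by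
  induction l generalizing acc with
  | nil => rfl
  | cons x xs ih =>
    rw [List.foldl_cons, h x (by simp)]
    exact ih (fun j hj => h j (by simp [hj])) acc

lemma pvLoop_eq (s : List Char) (fuel : Nat) : ∀ (i : Nat), s.length ≤ i + fuel → i ≤ s.length →
    ∀ (start : Int) (sent math : List (Option String)),
    pvLoopB s fuel i start sent math
      = (PySem.List.pyRange (i : Int) ((s.length : Int) - 2) 1).foldl (pvStepA s) (start, sent, math) := by
  induction fuel with
  | zero =>
    intro i hfuel hi start sent math
    rw [PySem.List.pyRange_one_eq_nil (by omega)]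
    rfl
  | succ fuel ih =>
    intro i hfuel hi start sent math
    rw [pvLoopB]
    cases hnd : pvNextDelim s i with
    | none =>
      rw [pvFold_id s _ (fun j hj acc => by
        rw [PySem.List.mem_pyRange_one] at hj
        have h0 : (0 : Int) ≤ j := le_trans (by omega) hj.1
        refine pvStepA_id s j h0 (fun hd => ?_) acc
        exact pvNextDelim_none s i hi hnd j.toNat (by omega) hd)]
    | some pos =>
      dsimp only
      obtain ⟨hip, hdelim, hnone⟩ := pvNextDelim_some s i hi pos hnd
      have hpos0 : (0 : Int) ≤ pos := le_trans (by omega) hip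
      have hnoneInt : ∀ j : Int, (i : Int) ≤ j → j < pos → 0 ≤ j → ¬ pvHasDelim s j.toNat := by
        intro j h1 h2 h0 hd
        exact hnone j.toNat (by omega) (by omega) hd
      by_cases hbig : pos > (s.length : Int) - 3
      · rw [if_pos hbig, pvFold_id s _ (fun j hj acc => by
          rw [PySem.List.mem_pyRange_one] at hj
          have h0 : (0 : Int) ≤ j := le_trans (by omega) hj.1
          exact pvStepA_id s j h0 (hnoneInt j hj.1 (by omega) h0) acc)]
      · rw [if_neg hbig]
        rw [not_lt] at hbig
        have hposlt : pos < (s.length : Int) - 2 := by omega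
        rw [PySem.List.pyRange_one_append (i : Int) pos ((s.length : Int) - 2) hip (by omega),
            PySem.List.pyRange_one_cons hposlt, List.foldl_append,
            pvFold_id s (PySem.List.pyRange (i : Int) pos 1) (fun j hj acc => by
              rw [PySem.List.mem_pyRange_one] at hj
              have h0 : (0 : Int) ≤ j := le_trans (by omega) hj.1
              exact pvStepA_id s j h0 (hnoneInt j hj.1 hj.2 h0) acc),
            List.foldl_cons]
        have hi' : pos.toNat + 1 ≤ s.length := by omega
        have hfuel' : s.length ≤ (pos.toNat + 1) + fuel := by omega
        have hcast : ((pos.toNat + 1 : Nat) : Int) = pos + 1 := by omega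
        rw [pvToken_eq s pos hpos0]
        rcases hdelim with hp | hp | hp | hp
        · have ht : (s.drop pos.toNat).take 2 = ['\\', '['] := (pvTake_two_eq_iff _ _ rfl).mpr hp
          rw [if_pos (Or.inl ht), pvStepA_open s pos hpos0 (Or.inl ht),
              ih (pos.toNat + 1) hfuel' hi' pos _ math, hcast]
        · have ht : (s.drop pos.toNat).take 2 = ['\\', '('] := (pvTake_two_eq_iff _ _ rfl).mpr hp
          rw [if_pos (Or.inr ht), pvStepA_open s pos hpos0 (Or.inr ht),
              ih (pos.toNat + 1) hfuel' hi' pos _ math, hcast]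
        · have ht : (s.drop pos.toNat).take 2 = ['\\', ']'] := (pvTake_two_eq_iff _ _ rfl).mpr hp
          have hno : ¬ ((s.drop pos.toNat).take 2 = ['\\', '['] ∨ (s.drop pos.toNat).take 2 = ['\\', '(']) := by
            rintro (hx | hx) <;> rw [ht] at hx <;> exact absurd hx (by decide)
          rw [if_neg hno, pvStepA_close s pos hpos0 hno (Or.inl ht),
              ih (pos.toNat + 1) hfuel' hi' (pos + 3) sent _, hcast]
        · have ht : (s.drop pos.toNat).take 2 = ['\\', ')'] := (pvTake_two_eq_iff _ _ rfl).mpr hp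
          have hno : ¬ ((s.drop pos.toNat).take 2 = ['\\', '['] ∨ (s.drop pos.toNat).take 2 = ['\\', '(']) := by
            rintro (hx | hx) <;> rw [ht] at hx <;> exact absurd hx (by decide)
          rw [if_neg hno, pvStepA_close s pos hpos0 hno (Or.inr ht),
              ih (pos.toNat + 1) hfuel' hi' (pos + 3) sent _, hcast]

-- ===== VERDICT (by name: the statement is the Claim_ definition above) =====
theorem divide_solving_spec : Claim_equal_divide_solving := by
  unfold Claim_equal_divide_solving Spec_divide_solving
  intro solving _
  show divide_solving solving = divide_solving_alt solving
  have key : ∀ (s : List Char) (init : Int × List (Option String) × List (Option String)),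
      pvLoopB s (s.length + 1) 0 init.1 init.2.1 init.2.2
        = (PySem.List.pyRange 0 ((s.length : Int) - 2) 1).foldl (pvStepA s) init := by
    intro s init
    rw [pvLoop_eq s (s.length + 1) 0 (by omega) (by omega)]
    norm_num
  simp only [divide_solving, divide_solving_alt, key]
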